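-- pv_equiv track=rewrite | github.com/shironetsu/primeless-year | primeless_year.py | get_prime_mmdds
-- ===== SOURCE A (Python) =====
-- from typing import List
--
-- def is_leap_year(year: int) -> bool:
--     if(year % 400 == 0):
--         return True
--     elif(year % 100 == 0):
--         return False
--     elif(year % 4 == 0):
--         return True
--     else:
--         return False
--
-- def is_prime(n: int) -> bool:
--     k = 2
--     while k * k <= n:
--         if n % k == 0:
--             return False
--         k += 1
--     return True
--
-- mmdds = [101, 102, 103, 104, 105, 106, 107, 108, 109, 110, 111, 112, 113, 114, 115, 116, 117, 118, 119,
--          120, 121, 122, 123, 124, 125, 126, 127, 128, 129, 130, 131, 201, 202, 203, 204, 205, 206, 207,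
--          208, 209, 210, 211, 212, 213, 214, 215, 216, 217, 218, 219, 220, 221, 222, 223, 224, 225, 226,
--          227, 228, 229, 301, 302, 303, 304, 305, 306, 307, 308, 309, 310, 311, 312, 313, 314, 315, 316,
--          317, 318, 319, 320, 321, 322, 323, 324, 325, 326, 327, 328, 329, 330, 331, 401, 402, 403, 404,
--          405, 406, 407, 408, 409, 410, 411, 412, 413, 414, 415, 416, 417, 418, 419, 420, 421, 422, 423,
--          424, 425, 426, 427, 428, 429, 430, 501, 502, 503, 504, 505, 506, 507, 508, 509, 510, 511, 512,
--          513, 514, 515, 516, 517, 518, 519, 520, 521, 522, 523, 524, 525, 526, 527, 528, 529, 530, 531,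
--          601, 602, 603, 604, 605, 606, 607, 608, 609, 610, 611, 612, 613, 614, 615, 616, 617, 618, 619,
--          620, 621, 622, 623, 624, 625, 626, 627, 628, 629, 630, 701, 702, 703, 704, 705, 706, 707, 708,
--          709, 710, 711, 712, 713, 714, 715, 716, 717, 718, 719, 720, 721, 722, 723, 724, 725, 726, 727,
--          728, 729, 730, 731, 801, 802, 803, 804, 805, 806, 807, 808, 809, 810, 811, 812, 813, 814, 815,
--          816, 817, 818, 819, 820, 821, 822, 823, 824, 825, 826, 827, 828, 829, 830, 831, 901, 902, 903,
--          904, 905, 906, 907, 908, 909, 910, 911, 912, 913, 914, 915, 916, 917, 918, 919, 920, 921, 922,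
--          923, 924, 925, 926, 927, 928, 929, 930, 1001, 1002, 1003, 1004, 1005, 1006, 1007, 1008, 1009,
--          1010, 1011, 1012, 1013, 1014, 1015, 1016, 1017, 1018, 1019, 1020, 1021, 1022, 1023, 1024, 1025,
--          1026, 1027, 1028, 1029, 1030, 1031, 1101, 1102, 1103, 1104, 1105, 1106, 1107, 1108, 1109, 1110,
--          1111, 1112, 1113, 1114, 1115, 1116, 1117, 1118, 1119, 1120, 1121, 1122, 1123, 1124, 1125, 1126,
--          1127, 1128, 1129, 1130, 1201, 1202, 1203, 1204, 1205, 1206, 1207, 1208, 1209, 1210, 1211, 1212,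
--          1213, 1214, 1215, 1216, 1217, 1218, 1219, 1220, 1221, 1222, 1223, 1224, 1225, 1226, 1227, 1228,
--          1229, 1230, 1231]
--
-- def get_prime_mmdds(year: int) -> List[int]:
--     prime_mmdds = []
--     for mmdd in mmdds:
--         if mmdd == 229 and is_leap_year(year):
--             continue
--         n = year * 10000 + mmdd
--         if is_prime(n):
--             prime_mmdds.append(mmdd)
--     return prime_mmdds
-- ===== SOURCE B (Python) =====
-- def get_prime_mmdds(year):
--     # Segmented sieve over the window [year*10000+101, year*10000+1231]:
--     # one marking pass per trial divisor k instead of per-date trial division.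
--     lo = year * 10000 + 101
--     hi = year * 10000 + 1231
--     composite = [False] * (hi - lo + 1)
--     k = 2
--     while k * k <= hi:
--         start = ((lo + k - 1) // k) * k  # smallest multiple of k >= lo
--         if start < k * k:
--             start = k * k
--         for m in range(start, hi + 1, k):
--             composite[m - lo] = True
--         k += 1
--     days = [31, 29, 31, 30, 31, 30, 31, 31, 30, 31, 30, 31]
--     leap = year % 400 == 0 or (year % 100 != 0 and year % 4 == 0)
--     out = []
--     for i, nd in enumerate(days):
--         for dd in range(1, nd + 1):
--             mmdd = (i + 1) * 100 + dd
--             if mmdd == 229 and leap: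
--                 continue
--             if not composite[year * 10000 + mmdd - lo]:
--                 out.append(mmdd)
--     return out
-- ===== Notes on version B (the rewrite author's own statement) =====
-- stated objective: faster
-- what changed: Replaces per-date trial division (366 independent is_prime scans up to sqrt(n)) by a single segmented sieve over the window [year*10000+101, year*10000+1231]: one pass over trial divisors k marking their multiples in a boolean window, dates generated from a days-per-month table instead of the literal list.
import Mathlib
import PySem

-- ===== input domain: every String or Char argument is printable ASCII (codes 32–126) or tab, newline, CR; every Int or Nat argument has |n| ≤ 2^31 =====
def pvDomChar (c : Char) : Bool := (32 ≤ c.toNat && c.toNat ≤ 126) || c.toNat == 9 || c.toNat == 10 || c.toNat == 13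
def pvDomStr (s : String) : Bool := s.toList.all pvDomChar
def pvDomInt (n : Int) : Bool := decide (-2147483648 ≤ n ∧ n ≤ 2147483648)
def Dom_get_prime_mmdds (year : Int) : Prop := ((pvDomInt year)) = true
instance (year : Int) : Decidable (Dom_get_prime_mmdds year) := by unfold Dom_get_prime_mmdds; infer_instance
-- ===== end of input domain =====

-- B replaces A's 366 independent trial divisions by one segmented sieve over the year's date window; objective: faster (constant factor).

-- ===== PORT A =====
def is_leap_year (year : Int) : Bool :=
  if PySem.Int.mod year 400 == 0 then true
  else if PySem.Int.mod year 100 == 0 then false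
  else if PySem.Int.mod year 4 == 0 then true
  else false

-- the 'while k * k <= n' trial-division loop of A's is_prime
def isPrimeAux (n k : Int) : Bool :=
  if _h : k * k ≤ n then
    if PySem.Int.mod n k == 0 then false
    else isPrimeAux n (k + 1)
  else true
termination_by (n + 1 - k).toNat
decreasing_by
  have hk : k ≤ n := by nlinarith [mul_self_nonneg (2*k - 1)]
  omega

def is_prime (n : Int) : Bool := isPrimeAux n 2

def mmddsLit : List Int :=
[101, 102, 103, 104, 105, 106, 107, 108, 109, 110, 111, 112, 113, 114, 115, 116, 117, 118, 119, 120,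
121, 122, 123, 124, 125, 126, 127, 128, 129, 130, 131, 201, 202, 203, 204, 205, 206, 207, 208, 209,
210, 211, 212, 213, 214, 215, 216, 217, 218, 219, 220, 221, 222, 223, 224, 225, 226, 227, 228, 229,
301, 302, 303, 304, 305, 306, 307, 308, 309, 310, 311, 312, 313, 314, 315, 316, 317, 318, 319, 320,
321, 322, 323, 324, 325, 326, 327, 328, 329, 330, 331, 401, 402, 403, 404, 405, 406, 407, 408, 409,
410, 411, 412, 413, 414, 415, 416, 417, 418, 419, 420, 421, 422, 423, 424, 425, 426, 427, 428, 429,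
430, 501, 502, 503, 504, 505, 506, 507, 508, 509, 510, 511, 512, 513, 514, 515, 516, 517, 518, 519,
520, 521, 522, 523, 524, 525, 526, 527, 528, 529, 530, 531, 601, 602, 603, 604, 605, 606, 607, 608,
609, 610, 611, 612, 613, 614, 615, 616, 617, 618, 619, 620, 621, 622, 623, 624, 625, 626, 627, 628,
629, 630, 701, 702, 703, 704, 705, 706, 707, 708, 709, 710, 711, 712, 713, 714, 715, 716, 717, 718,
719, 720, 721, 722, 723, 724, 725, 726, 727, 728, 729, 730, 731, 801, 802, 803, 804, 805, 806, 807,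
808, 809, 810, 811, 812, 813, 814, 815, 816, 817, 818, 819, 820, 821, 822, 823, 824, 825, 826, 827,
828, 829, 830, 831, 901, 902, 903, 904, 905, 906, 907, 908, 909, 910, 911, 912, 913, 914, 915, 916,
917, 918, 919, 920, 921, 922, 923, 924, 925, 926, 927, 928, 929, 930, 1001, 1002, 1003, 1004, 1005,
1006, 1007, 1008, 1009, 1010, 1011, 1012, 1013, 1014, 1015, 1016, 1017, 1018, 1019, 1020, 1021,
1022, 1023, 1024, 1025, 1026, 1027, 1028, 1029, 1030, 1031, 1101, 1102, 1103, 1104, 1105, 1106,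
1107, 1108, 1109, 1110, 1111, 1112, 1113, 1114, 1115, 1116, 1117, 1118, 1119, 1120, 1121, 1122,
1123, 1124, 1125, 1126, 1127, 1128, 1129, 1130, 1201, 1202, 1203, 1204, 1205, 1206, 1207, 1208,
1209, 1210, 1211, 1212, 1213, 1214, 1215, 1216, 1217, 1218, 1219, 1220, 1221, 1222, 1223, 1224,
1225, 1226, 1227, 1228, 1229, 1230, 1231]

def get_prime_mmdds (year : Int) : List Int :=
  mmddsLit.foldl (fun prime_mmdds mmdd =>
    if mmdd == 229 && is_leap_year year then prime_mmdds
    else if is_prime (year * 10000 + mmdd) then prime_mmdds ++ [mmdd]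
    else prime_mmdds) []

-- ===== PORT B =====
-- outer 'while k * k <= hi' sieve loop of B; the inner 'for m in range(start, hi+1, k)' marking
-- loop is the foldl over pyRange (the marked indices are provably in range, so the total pySetD form is exact)
def sieveLoop (lo hi k : Int) (composite : List Bool) : List Bool :=
  if _h : k * k ≤ hi then
    let start0 := PySem.Int.floordiv (lo + k - 1) k * k
    let start := if start0 < k * k then k * k else start0
    sieveLoop lo hi (k + 1)
      ((PySem.List.pyRange start (hi + 1) k).foldl
        (fun comp m => PySem.List.pySetD comp (m - lo) true) composite)
  else composite
termination_by (hi + 1 - k).toNat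
decreasing_by
  have hk : k ≤ hi := by nlinarith [mul_self_nonneg (2*k - 1)]
  omega

def daysList : List Int := [31, 29, 31, 30, 31, 30, 31, 31, 30, 31, 30, 31]

def get_prime_mmdds_alt (year : Int) : List Int :=
  let lo := year * 10000 + 101
  let hi := year * 10000 + 1231
  let composite := sieveLoop lo hi 2 (List.replicate (hi - lo + 1).toNat false)
  let leap := PySem.Int.mod year 400 == 0 ||
    (!(PySem.Int.mod year 100 == 0) && PySem.Int.mod year 4 == 0)
  (PySem.List.enumerate daysList 0).foldl (fun out ind =>
    (PySem.List.pyRange 1 (ind.2 + 1) 1).foldl (fun out dd =>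
      let mmdd := (ind.1 + 1) * 100 + dd
      if mmdd == 229 && leap then out
      else if !(PySem.List.pyGetD composite (year * 10000 + mmdd - lo) false) then out ++ [mmdd]
      else out) out) []

-- ===== PRECONDITION & SPEC =====
def Spec_get_prime_mmdds (year : Int) (out : List Int) : Prop := out = get_prime_mmdds_alt year
instance (year : Int) (out : List Int) : Decidable (Spec_get_prime_mmdds year out) := by unfold Spec_get_prime_mmdds; infer_instance

-- ===== CLAIM (what is proved, stated in full; the proofs are below) =====
def Claim_equal_get_prime_mmdds : Prop := ∀ (year : Int), Dom_get_prime_mmdds year → Spec_get_prime_mmdds year (get_prime_mmdds year)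

-- ===== LEMMAS AND PROOFS =====

-- A's trial-division loop returns true iff no divisor j ≥ k with j*j ≤ n exists
theorem isPrimeAux_iff (n k : Int) (hk : 2 ≤ k) :
    isPrimeAux n k = true ↔ ∀ j : Int, k ≤ j → j * j ≤ n → ¬ (j ∣ n) := by
  revert hk
  induction k using isPrimeAux.induct (n := n) with
  | case1 k h hmod =>
    intro hk
    rw [isPrimeAux]
    simp only [dif_pos h, if_pos hmod, Bool.false_eq_true, false_iff]
    push Not
    refine ⟨k, le_refl k, h, ?_⟩
    rw [← PySem.Int.mod_eq_zero_iff_dvd]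
    exact of_decide_eq_true hmod
  | case2 k h hmod ih =>
    intro hk
    rw [isPrimeAux]
    simp only [dif_pos h, if_neg hmod]
    rw [ih (by omega)]
    constructor
    · intro H j hj hjj
      rcases eq_or_lt_of_le hj with heq | hlt
      · subst heq
        intro hd
        exact hmod (by simpa using (PySem.Int.mod_eq_zero_iff_dvd n k).mpr hd)
      · exact H j (by omega) hjj
    · intro H j hj hjj
      exact H j (by omega) hjj
  | case3 k h =>
    intro hk
    rw [isPrimeAux]
    simp only [dif_neg h, true_iff]
    intro j hj hjj hd
    have : k * k ≤ j * j := by nlinarith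
    omega

-- the inner marking pass preserves the window length
theorem mark_length (l : List Int) (lo : Int) (comp : List Bool) :
    (l.foldl (fun c m => PySem.List.pySetD c (m - lo) true) comp).length = comp.length := by
  induction l generalizing comp with
  | nil => rfl
  | cons m l ih => simp [List.foldl_cons, ih, PySem.List.length_pySetD]

-- cell i after one marking pass: its old value, or some marked m hits it
theorem mark_getD (l : List Int) (lo : Int) (comp : List Bool)
    (hl : ∀ m ∈ l, 0 ≤ m - lo ∧ m - lo < (comp.length : Int)) (i : Nat) :
    (l.foldl (fun c m => PySem.List.pySetD c (m - lo) true) comp).getD i false =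
      (comp.getD i false || l.any (fun m => m - lo == (i : Int))) := by
  induction l generalizing comp with
  | nil => simp
  | cons m l ih =>
    have hm := hl m (by simp)
    simp only [List.foldl_cons, List.any_cons]
    rw [ih _ (by intro x hx; have := hl x (by simp [hx]); rw [PySem.List.length_pySetD]; exact this)]
    rw [PySem.List.pySetD_of_nonneg _ _ hm.1]
    by_cases hcase : m - lo = (i : Int)
    · have : (m - lo).toNat = i := by omega
      rw [this]
      have hilt : i < comp.length := by omega
      simp [List.getD_eq_getElem?_getD, hilt, hcase]
    · have hne : (m - lo).toNat ≠ i := by omega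
      have hfalse : (m - lo == (i : Int)) = false := by simp [hcase]
      simp [List.getD_eq_getElem?_getD, List.getElem?_set_ne hne, hfalse]

-- 'start = max(k*k, smallest multiple of k ≥ lo)': divisibility and bracketing facts
theorem start0_facts (lo k : Int) (hk : 0 < k) :
    k ∣ PySem.Int.floordiv (lo + k - 1) k * k ∧
    lo ≤ PySem.Int.floordiv (lo + k - 1) k * k ∧
    PySem.Int.floordiv (lo + k - 1) k * k < lo + k := by
  rw [PySem.Int.floordiv_eq_ediv_of_pos hk]
  refine ⟨dvd_mul_left k _, ?_, ?_⟩
  · have h1 := Int.ediv_add_emod (lo + k - 1) k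
    have h2 := Int.emod_nonneg (lo + k - 1) (by omega : k ≠ 0)
    have h3 := Int.emod_lt_of_pos (lo + k - 1) hk
    have h4 : (lo + k - 1) / k * k = k * ((lo + k - 1) / k) := mul_comm _ _
    omega
  · have h1 := Int.ediv_add_emod (lo + k - 1) k
    have h2 := Int.emod_nonneg (lo + k - 1) (by omega : k ≠ 0)
    have h4 : (lo + k - 1) / k * k = k * ((lo + k - 1) / k) := mul_comm _ _
    omega

theorem sieveLoop_length (lo hi k : Int) (comp : List Bool) :
    (sieveLoop lo hi k comp).length = comp.length := by
  induction k, comp using sieveLoop.induct (lo := lo) (hi := hi) with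
  | case1 k comp h s0h s1h ih =>
    rw [sieveLoop]
    simp only [dif_pos h]
    simp only [s1h, s0h] at ih
    simp only [dite_eq_ite] at ih
    rw [ih, mark_length]
  | case2 k comp h =>
    rw [sieveLoop]
    simp only [dif_neg h]

-- the sieve's characterisation: cell i is set iff lo+i has a trial divisor j ≥ k with j*j ≤ lo+i
theorem sieveLoop_getD (lo hi k : Int) (hk : 2 ≤ k) (comp : List Bool)
    (hlen : (comp.length : Int) = hi - lo + 1) (i : Nat) (hilt : i < comp.length) :
    ((sieveLoop lo hi k comp).getD i false = true ↔
      (comp.getD i false = true ∨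
        ∃ j : Int, k ≤ j ∧ j * j ≤ lo + i ∧ j ∣ (lo + i))) := by
  revert hk hlen hilt
  induction k, comp using sieveLoop.induct (lo := lo) (hi := hi) with
  | case2 k comp h =>
    intro hk hlen hilt
    have hin : lo + (i : Int) ≤ hi := by omega
    rw [sieveLoop]
    simp only [dif_neg h]
    constructor
    · exact Or.inl
    · rintro (hc | ⟨j, hj, hjj, hd⟩)
      · exact hc
      · exfalso
        have : k * k ≤ j * j := by nlinarith
        omega
  | case1 k comp h s0h s1h ih =>
    intro hk hlen hilt
    have hin : lo + (i : Int) ≤ hi := by omega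
    have hkpos : (0 : Int) < k := by omega
    obtain ⟨hdvd0, hge0, hlt0⟩ := start0_facts lo k hkpos
    rw [sieveLoop]
    simp only [dif_pos h]
    simp only [s1h, s0h] at ih
    simp only [dite_eq_ite] at ih
    set start0 := PySem.Int.floordiv (lo + k - 1) k * k with hs0
    set start := if start0 < k * k then k * k else start0 with hs
    have hsdvd : k ∣ start := by
      rw [hs]; split
      · exact Dvd.intro k rfl
      · exact hdvd0
    have hsge : k * k ≤ start ∧ start0 ≤ start := by
      rw [hs]; split <;> constructor <;> omega
    have hbound : ∀ m ∈ PySem.List.pyRange start (hi + 1) k,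
        0 ≤ m - lo ∧ m - lo < (comp.length : Int) := by
      intro m hm
      rw [PySem.List.mem_pyRange_iff_of_pos hkpos] at hm
      constructor
      · omega
      · omega
    rw [ih (by omega) (by rw [mark_length]; exact hlen) (by rw [mark_length]; exact hilt)]
    rw [mark_getD _ _ _ hbound]
    have hany : ((PySem.List.pyRange start (hi + 1) k).any (fun m => m - lo == (i : Int))) = true ↔
        (k ∣ (lo + i) ∧ k * k ≤ lo + i) := by
      rw [List.any_eq_true]
      constructor
      · rintro ⟨m, hm, hmi⟩
        rw [PySem.List.mem_pyRange_iff_of_pos hkpos] at hm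
        have hmeq : m = lo + i := by have := of_decide_eq_true hmi; omega
        subst hmeq
        obtain ⟨h1, h2, h3⟩ := hm
        constructor
        · have := dvd_add h3 hsdvd
          simpa using this
        · omega
      · rintro ⟨hd, hsq⟩
        refine ⟨lo + i, ?_, by simp⟩
        rw [PySem.List.mem_pyRange_iff_of_pos hkpos]
        refine ⟨?_, by omega, ?_⟩
        · have hd0 : k ∣ (lo + i - start0) := dvd_sub hd hdvd0
          obtain ⟨c, hc⟩ := hd0
          have hcge : 0 ≤ c := by nlinarith
          rw [hs]; split
          · omega
          · nlinarith
        · exact dvd_sub hd hsdvd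
    constructor
    · rintro (hcomb | ⟨j, hj, hjj, hd⟩)
      · rw [Bool.or_eq_true] at hcomb
        rcases hcomb with hc | ha
        · exact Or.inl hc
        · right
          obtain ⟨hd, hsq⟩ := hany.mp ha
          exact ⟨k, le_refl k, hsq, hd⟩
      · exact Or.inr ⟨j, by omega, hjj, hd⟩
    · rintro (hc | ⟨j, hj, hjj, hd⟩)
      · exact Or.inl (by rw [Bool.or_eq_true]; exact Or.inl hc)
      · rcases eq_or_lt_of_le hj with heq | hlt
        · subst heq
          left
          rw [Bool.or_eq_true]
          right
          exact hany.mpr ⟨hd, hjj⟩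
        · exact Or.inr ⟨j, by omega, hjj, hd⟩

-- B's nested month/day loop is a fold of the flattened mmdd sequence
theorem nested_foldl {α : Type} (L : List (Int × Int)) (f : List α → Int → List α) (init : List α) :
    L.foldl (fun out ind => (PySem.List.pyRange 1 (ind.2+1) 1).foldl (fun out dd => f out ((ind.1+1)*100+dd)) out) init
      = (L.flatMap (fun ind => (PySem.List.pyRange 1 (ind.2+1) 1).map (fun dd => (ind.1+1)*100+dd))).foldl f init := by
  induction L generalizing init with
  | nil => rfl
  | cons p L ih => simp [List.foldl_append, List.foldl_map, ih]

-- B's month/day table generates exactly A's literal mmdd list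
set_option maxRecDepth 4096 in
theorem flat_eq : (PySem.List.enumerate daysList 0).flatMap
    (fun ind => (PySem.List.pyRange 1 (ind.2+1) 1).map (fun dd => (ind.1+1)*100+dd)) = mmddsLit := by decide

set_option maxRecDepth 4096 in
theorem mmdd_bounds : ∀ x ∈ mmddsLit, 101 ≤ x ∧ x ≤ 1231 := by decide

theorem leap_eq (year : Int) :
    is_leap_year year = (PySem.Int.mod year 400 == 0 ||
      (!(PySem.Int.mod year 100 == 0) && PySem.Int.mod year 4 == 0)) := by
  cases hb4 : (PySem.Int.mod year 400 == 0) <;>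
    cases hb1 : (PySem.Int.mod year 100 == 0) <;>
      cases hb2 : (PySem.Int.mod year 4 == 0) <;>
        simp only [is_leap_year, hb4, hb1, hb2] <;> rfl

-- the sieve cell of a date equals the negation of A's trial-division primality test
theorem composite_getD (year mmdd : Int) (h1 : 101 ≤ mmdd) (h2 : mmdd ≤ 1231) :
    PySem.List.pyGetD
      (sieveLoop (year * 10000 + 101) (year * 10000 + 1231) 2
        (List.replicate ((year * 10000 + 1231) - (year * 10000 + 101) + 1).toNat false))
      (year * 10000 + mmdd - (year * 10000 + 101)) false
    = !is_prime (year * 10000 + mmdd) := by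
  set lo := year * 10000 + 101 with hlo
  set hi := year * 10000 + 1231 with hhi
  have hsz : (hi - lo + 1).toNat = 1131 := by omega
  have hidx : year * 10000 + mmdd - lo = mmdd - 101 := by omega
  set comp0 := List.replicate (hi - lo + 1).toNat (false : Bool) with hc0
  have hlen0 : comp0.length = 1131 := by rw [hc0, List.length_replicate, hsz]
  have hlen : (sieveLoop lo hi 2 comp0).length = 1131 := by rw [sieveLoop_length, hlen0]
  set it := (mmdd - 101).toNat with hit
  have hitlt : it < 1131 := by omega
  have hcast : ((it : Int)) = mmdd - 101 := by omega
  rw [hidx, show mmdd - 101 = ((it : Int)) from hcast.symm]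
  rw [PySem.List.pyGetD_natCast]
  have hchar := sieveLoop_getD lo hi 2 (by omega) comp0 (by rw [hlen0]; omega) it (by omega)
  have hrep : comp0.getD it false = false := by
    rw [hc0]; simp [List.getD_eq_getElem?_getD, List.getElem?_replicate]
    split <;> rfl
  rw [hrep] at hchar
  have hn : lo + (it : Int) = year * 10000 + mmdd := by omega
  rw [hn] at hchar
  have hprime := isPrimeAux_iff (year * 10000 + mmdd) 2 (by omega)
  cases hp : is_prime (year * 10000 + mmdd) with
  | true =>
    simp only [Bool.not_true]
    rw [is_prime] at hp
    rw [hp] at hprime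
    cases hgd : (sieveLoop lo hi 2 comp0).getD it false with
    | false => rfl
    | true =>
      exfalso
      rcases hchar.mp hgd with hfalse | ⟨j, hj, hjj, hd⟩
      · exact absurd hfalse (by simp)
      · exact (hprime.mp rfl) j hj hjj hd
  | false =>
    simp only [Bool.not_false]
    rw [is_prime] at hp
    have : ¬ (∀ j : Int, 2 ≤ j → j * j ≤ year * 10000 + mmdd → ¬ (j ∣ year * 10000 + mmdd)) := by
      intro hall
      rw [hprime.mpr hall] at hp
      exact absurd hp (by simp)
    push Not at this
    obtain ⟨j, hj, hjj, hd⟩ := this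
    exact hchar.mpr (Or.inr ⟨j, hj, hjj, by simpa using hd⟩)

theorem main_eq (year : Int) : get_prime_mmdds year = get_prime_mmdds_alt year := by
  unfold get_prime_mmdds get_prime_mmdds_alt
  simp only []
  rw [nested_foldl (f := fun out x =>
    if x == 229 && (PySem.Int.mod year 400 == 0 ||
        (!(PySem.Int.mod year 100 == 0) && PySem.Int.mod year 4 == 0)) then out
    else if !(PySem.List.pyGetD
        (sieveLoop (year * 10000 + 101) (year * 10000 + 1231) 2
          (List.replicate ((year * 10000 + 1231) - (year * 10000 + 101) + 1).toNat false))
        (year * 10000 + x - (year * 10000 + 101)) false) then out ++ [x]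
    else out)]
  rw [flat_eq]
  apply PySem.List.foldl_congr_mem'
  intro mmdd hmem acc
  obtain ⟨hb1, hb2⟩ := mmdd_bounds mmdd hmem
  rw [leap_eq]
  by_cases h229 : (mmdd == 229 &&
      (PySem.Int.mod year 400 == 0 || (!(PySem.Int.mod year 100 == 0) && PySem.Int.mod year 4 == 0))) = true
  · rw [if_pos h229, if_pos h229]
  · rw [if_neg h229, if_neg h229]
    rw [composite_getD year mmdd hb1 hb2]
    rw [Bool.not_not]

-- ===== VERDICT (by name: the statement is the Claim_ definition above) =====
theorem get_prime_mmdds_spec : Claim_equal_get_prime_mmdds := by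
  intro year _
  unfold Spec_get_prime_mmdds
  exact main_eq year
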